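-- pv_equiv track=rewrite | github.com/ayushpatel497/Daily_POTD | Day171_2025/Q171_GFG.py | validgroup
-- ===== SOURCE A (Python) =====
-- def validgroup(arr, k):
--     arr.sort()
--     n = len(arr)
--     used = [False] * n
--
--     for i in range(n):
--         if used[i]:
--             continue
--         count = 0
--         curr = arr[i]
--
--         for j in range(i, n):
--             if not used[j] and arr[j] == curr:
--                 used[j] = True
--                 count += 1
--                 curr += 1
--             if count == k:
--                 break
--
--         if count != k:
--             return False
--
--     return True
-- ===== SOURCE B (Python) =====
-- def validgroup(arr, k):
--     # Counter-based greedy (a different algorithm; does not mutate arr, while A sorts it in place).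
--     if k <= 0:
--         return not arr
--     cnt = {}
--     for x in arr:
--         cnt[x] = cnt.get(x, 0) + 1
--     for x in sorted(cnt):
--         c = cnt[x]
--         if c:
--             for y in range(x + 1, x + k):
--                 if cnt.get(y, 0) < c:
--                     return False
--                 cnt[y] = cnt[y] - c
--     return True
-- ===== Notes on version B (the rewrite author's own statement) =====
-- stated objective: alternative
-- what changed: Replaces A's used-flag scan over the sorted array (extracting one group of k consecutive values at a time) by a count-dict greedy: build a value->count dict, then for each sorted distinct value consume all groups starting there at once by subtracting its residual count from the next k-1 counts.
import Mathlib
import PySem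

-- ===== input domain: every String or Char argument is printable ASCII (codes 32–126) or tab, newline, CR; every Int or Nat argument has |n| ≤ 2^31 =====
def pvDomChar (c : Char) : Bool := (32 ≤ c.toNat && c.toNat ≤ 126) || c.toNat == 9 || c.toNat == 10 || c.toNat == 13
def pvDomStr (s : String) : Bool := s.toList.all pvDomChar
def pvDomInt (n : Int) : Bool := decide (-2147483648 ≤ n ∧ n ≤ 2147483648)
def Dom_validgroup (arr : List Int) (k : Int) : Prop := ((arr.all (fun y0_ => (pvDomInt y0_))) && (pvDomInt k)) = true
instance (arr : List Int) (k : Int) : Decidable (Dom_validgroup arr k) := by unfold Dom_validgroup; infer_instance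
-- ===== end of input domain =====

-- B replaces A's used-flag scan by a count-dict greedy over the sorted distinct values
-- (objective: alternative); the equivalence is about the return value only: A sorts its
-- argument in place, B does not mutate it.

-- ===== PORT A =====
-- inner loop 'for j in range(i, n)'; arr[j] is read with getD 0 (j is always in range here, so
-- this is exact); the 'if count == k: break' check runs at the end of every iteration as in A.
def pvInnerA (s : List Int) (k : Int) : List Nat → List Bool → Int → Int → (List Bool × Int)
  | [], used, count, _curr => (used, count)
  | j :: js, used, count, curr =>
    if !(used.getD j false) && decide (s.getD j 0 = curr) then
      if count + 1 = k then (used.set j true, count + 1)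
      else pvInnerA s k js (used.set j true) (count + 1) (curr + 1)
    else
      if count = k then (used, count) else pvInnerA s k js used count curr

-- outer loop 'for i in range(n)' with early 'return False'
def pvOuterA (s : List Int) (k : Int) : List Nat → List Bool → Bool
  | [], _ => true
  | i :: is, used =>
    if used.getD i false then pvOuterA s k is used
    else
      let r := pvInnerA s k (List.range' i (s.length - i)) used 0 (s.getD i 0)
      if r.2 = k then pvOuterA s k is r.1 else false

def validgroup (arr : List Int) (k : Int) : Bool :=
  let s := PySem.List.sorted arr (fun x => x) false
  pvOuterA s k (List.range s.length) (List.replicate s.length false)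

-- ===== PORT B =====
-- inner loop 'for y in range(x+1, x+k)' with early 'return False' (none); Python's range is
-- lazy, so it is ported as a counting loop over y (y from x+1 while y < x+k); cnt[y] is read
-- with getD 0, which is exact: the write is guarded by c <= cnt.get(y, 0), so y is a key.
def pvInnerB (c stop y : Int) (cnt : PySem.Dict Int Int) : Option (PySem.Dict Int Int) :=
  if y < stop then
    (if cnt.getD y 0 < c then none
     else pvInnerB c stop (y + 1) (cnt.insert y (cnt.getD y 0 - c)))
  else some cnt
termination_by (stop - y).toNat
decreasing_by omega

-- loop 'for x in sorted(cnt)'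
def pvOuterB (k : Int) : List Int → PySem.Dict Int Int → Bool
  | [], _ => true
  | x :: xs, cnt =>
    let c := cnt.getD x 0
    if c ≠ 0 then
      match pvInnerB c (x + k) (x + 1) cnt with
      | none => false
      | some cnt' => pvOuterB k xs cnt'
    else pvOuterB k xs cnt

def validgroup_alt (arr : List Int) (k : Int) : Bool :=
  if k ≤ 0 then decide (arr = [])
  else
    let cnt := arr.foldl (fun d x => d.insert x (d.getD x 0 + 1)) PySem.Dict.empty
    pvOuterB k (PySem.List.sorted cnt.keys (fun x => x) false) cnt

-- ===== PRECONDITION & SPEC =====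
def Spec_validgroup (arr : List Int) (k : Int) (out : Bool) : Prop := out = validgroup_alt arr k
instance (arr : List Int) (k : Int) (out : Bool) : Decidable (Spec_validgroup arr k out) := by unfold Spec_validgroup; infer_instance

-- ===== CLAIM (what is proved, stated in full; the proofs are below) =====
def Claim_equal_validgroup : Prop := ∀ (arr : List Int) (k : Int), Dom_validgroup arr k → Spec_validgroup arr k (validgroup arr k)

-- ===== LEMMAS AND PROOFS =====

-- Reference greedy: repeatedly take the minimum of the (sorted) remaining list and remove
-- one occurrence of each of the k consecutive values starting there.
def pvConsume : Int → Nat → List Int → Option (List Int)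
  | _, 0, l => some l
  | v, m + 1, l => if v ∈ l then pvConsume (v + 1) m (l.erase v) else none

theorem pvConsume_length_le : ∀ (m : Nat) (v : Int) (l l' : List Int),
    pvConsume v m l = some l' → l'.length ≤ l.length := by
  intro m
  induction m with
  | zero => intro v l l' h; simp [pvConsume] at h; simp [h]
  | succ m ih =>
    intro v l l' h
    simp only [pvConsume] at h
    split at h
    · have := ih (v + 1) (l.erase v) l' h
      have h2 : (l.erase v).length ≤ l.length := List.length_erase_le
      omega
    · exact absurd h (by simp)

def pvG (k : Int) : List Int → Bool
  | [] => true
  | x :: xs =>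
    match h : pvConsume (x + 1) (k - 1).toNat xs with
    | some l' => pvG k l'
    | none => false
termination_by l => l.length
decreasing_by
  have := pvConsume_length_le (k - 1).toNat (x + 1) xs l' h
  simp; omega

-- ---------- A side ----------

def pvRemSeg (s : List Int) (used : List Bool) (a len : Nat) : List Int :=
  ((List.range' a len).filter (fun j => !(used.getD j false))).map (fun j => s.getD j 0)

def pvRem (s : List Int) (used : List Bool) : List Int := pvRemSeg s used 0 s.length

theorem pvRemSeg_append (s : List Int) (used : List Bool) (a l1 l2 : Nat) :
    pvRemSeg s used a (l1 + l2) = pvRemSeg s used a l1 ++ pvRemSeg s used (a + l1) l2 := by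
  have h : List.range' a (l1 + l2) = List.range' a l1 ++ List.range' (a + l1) l2 := by
    rw [← List.range'_append, one_mul]
  unfold pvRemSeg
  rw [h, List.filter_append, List.map_append]

theorem mem_pvRemSeg (s : List Int) (used : List Bool) (a len : Nat) (y : Int) :
    y ∈ pvRemSeg s used a len ↔
      ∃ j, a ≤ j ∧ j < a + len ∧ used.getD j false = false ∧ s.getD j 0 = y := by
  simp only [pvRemSeg, List.mem_map, List.mem_filter, List.mem_range'_1, Bool.not_eq_eq_eq_not,
    Bool.not_true]
  constructor
  · rintro ⟨j, ⟨⟨hj1, hj2⟩, hu⟩, hy⟩; exact ⟨j, hj1, hj2, hu, hy⟩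
  · rintro ⟨j, hj1, hj2, hu, hy⟩; exact ⟨j, ⟨⟨hj1, hj2⟩, hu⟩, hy⟩

theorem pvRemSeg_congr (s : List Int) (used used' : List Bool) (a len : Nat)
    (h : ∀ j, a ≤ j → j < a + len → used.getD j false = used'.getD j false) :
    pvRemSeg s used a len = pvRemSeg s used' a len := by
  unfold pvRemSeg
  congr 1
  apply List.filter_congr
  intro j hj
  rw [List.mem_range'_1] at hj
  rw [h j hj.1 hj.2]

theorem pvRemSeg_cons_unused (s : List Int) (used : List Bool) (a m : Nat)
    (h : used.getD a false = false) :
    pvRemSeg s used a (m + 1) = s.getD a 0 :: pvRemSeg s used (a + 1) m := by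
  unfold pvRemSeg
  rw [List.range'_succ]
  rw [List.getD_eq_getElem?_getD] at h
  simp [List.filter_cons, h, List.getD_eq_getElem?_getD]

theorem pvRemSeg_cons_used (s : List Int) (used : List Bool) (a m : Nat)
    (h : used.getD a false = true) :
    pvRemSeg s used a (m + 1) = pvRemSeg s used (a + 1) m := by
  unfold pvRemSeg
  rw [List.range'_succ]
  rw [List.getD_eq_getElem?_getD] at h
  simp [List.filter_cons, h]

theorem getD_set_self (l : List Bool) (j : Nat) (hj : j < l.length) (b : Bool) :
    (l.set j b).getD j false = b := by
  rw [List.getD_eq_getElem?_getD, List.getElem?_set_self hj]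
  rfl

theorem getD_set_ne (l : List Bool) (i j : Nat) (h : i ≠ j) (b : Bool) :
    (l.set i b).getD j false = l.getD j false := by
  rw [List.getD_eq_getElem?_getD, List.getElem?_set_ne h, ← List.getD_eq_getElem?_getD]

theorem sorted_getD_mono (s : List Int) (hs : s.Pairwise (· ≤ ·)) (i j : Nat)
    (hij : i ≤ j) (hj : j < s.length) : s.getD i 0 ≤ s.getD j 0 := by
  rcases Nat.eq_or_lt_of_le hij with h | h
  · rw [h]
  · have hi : i < s.length := lt_trans h hj
    rw [List.getD_eq_getElem?_getD, List.getD_eq_getElem?_getD, List.getElem?_eq_getElem hi,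
      List.getElem?_eq_getElem hj]
    exact List.pairwise_iff_getElem.mp hs i j hi hj h

-- A's inner loop never decreases count
theorem pvInnerA_count_le (s : List Int) (k : Int) :
    ∀ (js : List Nat) (used : List Bool) (count curr : Int),
      count ≤ (pvInnerA s k js used count curr).2 := by
  intro js
  induction js with
  | nil => intro used count curr; simp [pvInnerA]
  | cons j js ih =>
    intro used count curr
    simp only [pvInnerA]
    by_cases h1 : (!(used.getD j false) && decide (s.getD j 0 = curr)) = true
    · rw [if_pos h1]
      by_cases h2 : count + 1 = k
      · rw [if_pos h2]; simp
      · rw [if_neg h2]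
        have := ih (used.set j true) (count + 1) (curr + 1)
        omega
    · rw [if_neg h1]
      by_cases h2 : count = k
      · rw [if_pos h2]
      · rw [if_neg h2]; exact ih used count curr


theorem pvRem_decomp (s : List Int) (used : List Bool) (p m' : Nat)
    (h : p + (m' + 1) = s.length) (hu : used.getD p false = false) :
    pvRem s used = pvRemSeg s used 0 p ++ (s.getD p 0 :: pvRemSeg s used (p + 1) m') := by
  unfold pvRem
  rw [show s.length = p + (m' + 1) by omega, pvRemSeg_append]
  rw [Nat.zero_add, pvRemSeg_cons_unused s used p m' hu]

theorem pvRem_set (s : List Int) (used : List Bool) (p m' : Nat)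
    (h : p + (m' + 1) = s.length) (hlen : used.length = s.length) :
    pvRem s (used.set p true) = pvRemSeg s used 0 p ++ pvRemSeg s used (p + 1) m' := by
  unfold pvRem
  rw [show s.length = p + (m' + 1) by omega, pvRemSeg_append, Nat.zero_add]
  rw [pvRemSeg_cons_used s (used.set p true) p m' (getD_set_self used p (by omega) true)]
  congr 1
  · exact pvRemSeg_congr s (used.set p true) used 0 p (by
      intro j _ hj2; exact getD_set_ne used p j (by omega) true)
  · exact pvRemSeg_congr s (used.set p true) used (p + 1) m' (by
      intro j hj1 _; exact getD_set_ne used p j (by omega) true)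

theorem notmem_pvRemSeg_below (s : List Int) (used : List Bool) (p : Nat) (curr : Int)
    (hinv : ∀ j, j < p → used.getD j false = false → s.getD j 0 < curr) :
    curr ∉ pvRemSeg s used 0 p := by
  rw [mem_pvRemSeg]
  rintro ⟨j, _, hj2, hu, hy⟩
  have := hinv j (by omega) hu
  omega

theorem pvInnerA_stall (s : List Int) (k : Int) :
    ∀ (js : List Nat) (used : List Bool) (count curr : Int),
      (∀ j ∈ js, used.getD j false = true ∨ s.getD j 0 ≠ curr) →
      pvInnerA s k js used count curr = (used, count) := by
  intro js
  induction js with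
  | nil => intro used count curr _; rfl
  | cons j js ih =>
    intro used count curr h
    have hj := h j (by simp)
    simp only [pvInnerA]
    rw [if_neg (by
      simp only [List.getD_eq_getElem?_getD] at hj
      rcases hj with hj | hj <;> simp [hj])]
    by_cases h2 : count = k
    · rw [if_pos h2, h2]
    · rw [if_neg h2]
      exact ih used count curr (fun j' hj' => h j' (by simp [hj']))

-- the central simulation lemma for A's inner loop
theorem pvInnerA_sim (s : List Int) (k : Int) (hs : s.Pairwise (· ≤ ·)) :
    ∀ (m p : Nat) (used : List Bool) (curr : Int) (K : Nat),
      p + m = s.length → 1 ≤ K → used.length = s.length →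
      (∀ j, j < p → used.getD j false = false → s.getD j 0 < curr) →
      (match pvConsume curr K (pvRem s used) with
       | some l' => ∃ used',
           pvInnerA s k (List.range' p m) used (k - K) curr = (used', k) ∧
           used'.length = s.length ∧ pvRem s used' = l' ∧
           (∀ j, used.getD j false = true → used'.getD j false = true)
       | none => (pvInnerA s k (List.range' p m) used (k - K) curr).2 ≠ k) := by
  intro m
  induction m with
  | zero =>
    intro p used curr K hpm hK hlen hinv
    have hmem : curr ∉ pvRem s used := by
      rw [pvRem, mem_pvRemSeg]
      rintro ⟨j, _, hj2, hu, hy⟩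
      have := hinv j (by omega) hu
      omega
    obtain ⟨K', rfl⟩ : ∃ K', K = K' + 1 := ⟨K - 1, by omega⟩
    simp only [pvConsume, if_neg hmem]
    simp only [List.range'_zero, pvInnerA]
    omega
  | succ m' ih =>
    intro p used curr K hpm hK hlen hinv
    have hp : p < s.length := by omega
    rw [List.range'_succ]
    simp only [pvInnerA]
    by_cases hu : used.getD p false = true
    · -- index p already used: skip
      rw [if_neg (by
        have hu' := hu
        simp only [List.getD_eq_getElem?_getD] at hu'
        simp [hu']), if_neg (by omega)]
      exact ih (p + 1) used curr K (by omega) hK hlen (by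
        intro j hj hju
        rcases Nat.lt_or_ge j p with h | h
        · exact hinv j h hju
        · have : j = p := by omega
          rw [this] at hju; rw [hju] at hu; exact absurd hu (by simp))
    · -- index p unused
      simp only [Bool.not_eq_true] at hu
      by_cases hcur : s.getD p 0 = curr
      · -- match: consume s[p] = curr
        rw [if_pos (by
          have hu' := hu; have hc' := hcur
          simp only [List.getD_eq_getElem?_getD] at hu' hc'
          simp [hu', hc'])]
        have hdec := pvRem_decomp s used p m' (by omega) hu
        have hBmem : curr ∉ pvRemSeg s used 0 p := notmem_pvRemSeg_below s used p curr hinv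
        have hmem : curr ∈ pvRem s used := by rw [hdec, hcur]; simp
        have herase : (pvRem s used).erase curr = pvRem s (used.set p true) := by
          rw [hdec, hcur, List.erase_append_right _ hBmem, List.erase_cons_head]
          rw [pvRem_set s used p m' (by omega) hlen]
        have hmono1 : ∀ j, used.getD j false = true → (used.set p true).getD j false = true := by
          intro j hj
          by_cases hjp : j = p
          · rw [hjp]; exact getD_set_self used p (by omega) true
          · rw [getD_set_ne used p j (by omega) true]; exact hj
        obtain ⟨K', rfl⟩ : ∃ K', K = K' + 1 := ⟨K - 1, by omega⟩
        simp only [pvConsume, if_pos hmem, herase]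
        rcases Nat.eq_zero_or_pos K' with hK' | hK'
        · -- K = 1 : this is the k-th element, break
          subst hK'
          rw [if_pos (by push_cast; ring)]
          simp only [pvConsume]
          refine ⟨used.set p true, ?_, by simp [hlen], rfl, hmono1⟩
          simp only [Prod.mk.injEq]
          norm_num
        · -- K ≥ 2 : keep scanning
          rw [if_neg (by push_cast; omega)]
          have harith : k - (↑(K' + 1) : Int) + 1 = k - (K' : Int) := by push_cast; omega
          rw [harith]
          have := ih (p + 1) (used.set p true) (curr + 1) K' (by omega) (by omega)
            (by simp [List.length_set, hlen]) (by
              intro j hj hju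
              rcases Nat.lt_or_ge j p with h | h
              · rw [getD_set_ne used p j (by omega) true] at hju
                have := hinv j h hju; omega
              · have hjp : j = p := by omega
                rw [hjp] at hju
                rw [getD_set_self used p (by omega) true] at hju
                exact absurd hju (by simp))
          revert this
          cases hcons : pvConsume (curr + 1) K' (pvRem s (used.set p true)) with
          | some l' =>
            rintro ⟨used'', h1, h2, h3, h4⟩
            exact ⟨used'', h1, h2, h3, fun j hj => h4 j (hmono1 j hj)⟩
          | none => intro h1; exact h1
      · -- no match at p
        rw [if_neg (by
          have hu' := hu; have hc' := hcur
          simp only [List.getD_eq_getElem?_getD] at hu' hc'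
          simp [hu', hc'])]
        rw [if_neg (by omega)]
        rcases lt_or_gt_of_ne (show s.getD p 0 ≠ curr from hcur) with hlt | hgt
        · exact ih (p + 1) used curr K (by omega) hK hlen (by
            intro j hj hju
            rcases Nat.lt_or_ge j p with h | h
            · exact hinv j h hju
            · have : j = p := by omega
              rw [this]; exact hlt)
        · -- s[p] > curr: the scan stalls and consume fails
          have hmem : curr ∉ pvRem s used := by
            rw [pvRem, mem_pvRemSeg]
            rintro ⟨j, _, hj2, hju, hy⟩
            rcases Nat.lt_or_ge j p with h | h
            · have := hinv j h hju; omega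
            · have := sorted_getD_mono s hs p j h (by omega)
              omega
          obtain ⟨K', rfl⟩ : ∃ K', K = K' + 1 := ⟨K - 1, by omega⟩
          simp only [pvConsume, if_neg hmem]
          rw [pvInnerA_stall s k (List.range' (p + 1) m') used (k - ↑(K' + 1)) curr (by
            intro j hj
            rw [List.mem_range'_1] at hj
            right
            have := sorted_getD_mono s hs p j (by omega) (by omega)
            omega)]
          simp; omega

theorem pvG_cons (k x : Int) (xs : List Int) :
    pvG k (x :: xs) =
      (match pvConsume (x + 1) (k - 1).toNat xs with
       | some l' => pvG k l'
       | none => false) := by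
  rw [pvG]
  cases h2 : pvConsume (x + 1) (k - 1).toNat xs <;> rfl

theorem pvOuterA_sim (s : List Int) (k : Int) (hs : s.Pairwise (· ≤ ·)) (hk : 1 ≤ k) :
    ∀ (m p : Nat) (used : List Bool),
      p + m = s.length → used.length = s.length →
      (∀ j, j < p → used.getD j false = true) →
      pvOuterA s k (List.range' p m) used = pvG k (pvRem s used) := by
  intro m
  induction m with
  | zero =>
    intro p used hpm hlen hinv
    have hnil : pvRem s used = [] := by
      rw [List.eq_nil_iff_forall_not_mem]
      intro y hy
      rw [pvRem, mem_pvRemSeg] at hy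
      obtain ⟨j, _, hj2, hju, _⟩ := hy
      rw [hinv j (by omega)] at hju
      exact absurd hju (by simp)
    rw [hnil]
    simp [pvOuterA, pvG, List.range'_zero]
  | succ m' ih =>
    intro p used hpm hlen hinv
    have hp : p < s.length := by omega
    rw [List.range'_succ]
    simp only [pvOuterA]
    by_cases hu : used.getD p false = true
    · rw [if_pos hu]
      exact ih (p + 1) used (by omega) hlen (by
        intro j hj
        rcases Nat.lt_or_ge j p with h | h
        · exact hinv j h
        · have : j = p := by omega
          rw [this]; exact hu)
    · simp only [Bool.not_eq_true] at hu
      rw [if_neg (by rw [hu]; simp)]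
      have hB : pvRemSeg s used 0 p = [] := by
        rw [List.eq_nil_iff_forall_not_mem]
        intro y hy
        rw [mem_pvRemSeg] at hy
        obtain ⟨j, _, hj2, hju, _⟩ := hy
        rw [hinv j (by omega)] at hju
        exact absurd hju (by simp)
      have hdec := pvRem_decomp s used p m' (by omega) hu
      rw [hB, List.nil_append] at hdec
      have hrem1 : pvRem s (used.set p true) = pvRemSeg s used (p + 1) m' := by
        rw [pvRem_set s used p m' (by omega) hlen, hB, List.nil_append]
      have hmono1 : ∀ j, used.getD j false = true → (used.set p true).getD j false = true := by
        intro j hj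
        by_cases hjp : j = p
        · rw [hjp]; exact getD_set_self used p (by omega) true
        · rw [getD_set_ne used p j (by omega) true]; exact hj
      have hrange : s.length - p = m' + 1 := by omega
      have hstep : pvInnerA s k (List.range' p (s.length - p)) used 0 (s.getD p 0) =
          (if (0 : Int) + 1 = k then (used.set p true, (0 : Int) + 1)
           else pvInnerA s k (List.range' (p + 1) m') (used.set p true) (0 + 1)
             (s.getD p 0 + 1)) := by
        rw [hrange, List.range'_succ]
        simp only [pvInnerA]
        rw [if_pos (by rw [hu]; simp)]
      rw [hstep]
      by_cases hk1 : (0 : Int) + 1 = k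
      · simp only [if_pos hk1]
        rw [ih (p + 1) (used.set p true) (by omega) (by simp [hlen]) (by
          intro j hj
          rcases Nat.lt_or_ge j p with h | h
          · exact hmono1 j (hinv j h)
          · have : j = p := by omega
            rw [this]; exact getD_set_self used p (by omega) true)]
        rw [hrem1, hdec, pvG_cons]
        have h0 : (k - 1).toNat = 0 := by omega
        rw [h0]
        simp only [pvConsume]
      · simp only [if_neg hk1]
        have hKpos : 1 ≤ (k - 1).toNat := by omega
        have hcount : (0 : Int) + 1 = k - (((k - 1).toNat : Nat) : Int) := by omega
        rw [hcount]
        have hsim := pvInnerA_sim s k hs m' (p + 1) (used.set p true) (s.getD p 0 + 1)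
          (k - 1).toNat (by omega) hKpos (by simp [hlen]) (by
            intro j hj hju
            rcases Nat.lt_or_ge j p with h | h
            · rw [getD_set_ne used p j (by omega) true] at hju
              rw [hinv j h] at hju
              exact absurd hju (by simp)
            · have : j = p := by omega
              rw [this] at hju
              rw [getD_set_self used p (by omega) true] at hju
              exact absurd hju (by simp))
        rw [hrem1] at hsim
        rw [hdec, pvG_cons]
        revert hsim
        cases hcons : pvConsume (s.getD p 0 + 1) (k - 1).toNat (pvRemSeg s used (p + 1) m') with
        | some l' =>
          rintro ⟨used'', h1, h2, h3, h4⟩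
          rw [h1]
          rw [if_pos (show ((used'', k).2 = k) from rfl)]
          show pvOuterA s k (List.range' (p + 1) m') used'' = _
          rw [ih (p + 1) used'' (by omega) h2 (by
            intro j hj
            rcases Nat.lt_or_ge j p with h | h
            · exact h4 j (hmono1 j (hinv j h))
            · have : j = p := by omega
              rw [this]
              exact h4 p (getD_set_self used p (by omega) true))]
          rw [h3]
        | none =>
          intro hne
          rw [if_neg hne]

theorem pvRem_replicate_false (s : List Int) :
    pvRem s (List.replicate s.length false) = s := by
  unfold pvRem pvRemSeg
  have hrep : ∀ j : Nat, (List.replicate s.length (false : Bool)).getD j false = false := by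
    intro j
    rw [List.getD_eq_getElem?_getD, List.getElem?_replicate]
    split <;> rfl
  rw [List.filter_eq_self.mpr (by intro j _; simp [hrep j])]
  apply List.ext_getElem
  · simp
  · intro i h1 h2
    simp only [List.getElem_map, List.getElem_range']
    rw [List.getD_eq_getElem?_getD]
    rw [List.length_map, List.length_range'] at h1
    rw [List.getElem?_eq_getElem (by omega)]
    simp

theorem validgroup_eq_pvG (arr : List Int) (k : Int) (hk : 1 ≤ k) :
    validgroup arr k = pvG k (PySem.List.sorted arr (fun x => x) false) := by
  show pvOuterA (PySem.List.sorted arr (fun x => x) false) k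
      (List.range (PySem.List.sorted arr (fun x => x) false).length)
      (List.replicate (PySem.List.sorted arr (fun x => x) false).length false) = _
  have hs := PySem.List.sorted_pairwise arr (fun x => x) (κ := Int)
  set s := PySem.List.sorted arr (fun x => x) false with hsdef
  rw [List.range_eq_range']
  have := pvOuterA_sim s k hs hk s.length 0 (List.replicate s.length false) (by omega)
    (by simp) (by intro j hj; omega)
  rw [this, pvRem_replicate_false]

theorem validgroup_of_k_nonpos (arr : List Int) (k : Int) (hk : k ≤ 0) :
    validgroup arr k = decide (arr = []) := by
  rcases arr with _ | ⟨a0, arr'⟩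
  · simp [validgroup, pvOuterA]
  · show pvOuterA (PySem.List.sorted (a0 :: arr') (fun x => x) false) k
        (List.range (PySem.List.sorted (a0 :: arr') (fun x => x) false).length)
        (List.replicate (PySem.List.sorted (a0 :: arr') (fun x => x) false).length false) = _
    have hlen : (PySem.List.sorted (a0 :: arr') (fun x => x) false).length = (a0 :: arr').length := by
      simp
    set s := PySem.List.sorted (a0 :: arr') (fun x => x) false with hsdef
    have hn : 1 ≤ s.length := by rw [hlen]; simp
    rw [List.range_eq_range']
    obtain ⟨m, hm⟩ : ∃ m, s.length = m + 1 := ⟨s.length - 1, by omega⟩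
    have hrep : ∀ j : Nat, (List.replicate s.length (false : Bool)).getD j false = false := by
      intro j
      rw [List.getD_eq_getElem?_getD, List.getElem?_replicate]
      split <;> rfl
    rw [hm, List.range'_succ]
    simp only [pvOuterA]
    rw [← hm, if_neg (by rw [hrep 0]; simp)]
    have hinner : 1 ≤ (pvInnerA s k (List.range' 0 (s.length - 0))
        (List.replicate s.length false) 0 (s.getD 0 0)).2 := by
      have hsz : s.length - 0 = m + 1 := by omega
      rw [hsz, List.range'_succ]
      simp only [pvInnerA]
      rw [if_pos (by rw [hrep 0]; simp)]
      rw [if_neg (by omega)]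
      have := pvInnerA_count_le s k (List.range' (0 + 1) m) ((List.replicate s.length false).set 0 true)
        (0 + 1) (s.getD 0 0 + 1)
      omega
    rw [if_neg (by omega)]
    simp

-- ---------- B side ----------

def pvL (xs : List Int) (f : Int → Int) : List Int :=
  xs.flatMap (fun x => List.replicate (f x).toNat x)

theorem pvG_cons_some (k x : Int) (xs l' : List Int)
    (h : pvConsume (x + 1) (k - 1).toNat xs = some l') : pvG k (x :: xs) = pvG k l' := by
  rw [pvG_cons, h]

theorem pvG_cons_none (k x : Int) (xs : List Int)
    (h : pvConsume (x + 1) (k - 1).toNat xs = none) : pvG k (x :: xs) = false := by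
  rw [pvG_cons, h]

theorem mem_pvL (xs : List Int) (f : Int → Int) (y : Int) :
    y ∈ pvL xs f ↔ y ∈ xs ∧ 1 ≤ f y := by
  simp only [pvL, List.mem_flatMap, List.mem_replicate]
  constructor
  · rintro ⟨x, hx, hn, rfl⟩
    exact ⟨hx, by omega⟩
  · rintro ⟨hy, h1⟩
    exact ⟨y, hy, by omega, rfl⟩

theorem pvL_congr (xs : List Int) (f g : Int → Int) (h : ∀ x ∈ xs, f x = g x) :
    pvL xs f = pvL xs g := by
  revert h
  induction xs with
  | nil => intro _; rfl
  | cons x xs ih =>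
    intro h
    simp only [pvL, List.flatMap_cons]
    rw [h x (by simp)]
    have := ih (fun z hz => h z (by simp [hz]))
    simp only [pvL] at this
    rw [this]

theorem count_pvL (xs : List Int) (hnd : xs.Nodup) (f : Int → Int) (y : Int) :
    (pvL xs f).count y = if y ∈ xs then (f y).toNat else 0 := by
  revert hnd
  induction xs with
  | nil => intro _; simp [pvL]
  | cons x xs ih =>
    intro hnd
    rw [List.nodup_cons] at hnd
    simp only [pvL, List.flatMap_cons, List.count_append]
    have hih := ih hnd.2
    simp only [pvL] at hih
    rw [hih, List.count_replicate]
    by_cases hyx : y = x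
    · subst hyx
      rw [if_pos (by simp), if_neg hnd.1, if_pos (by simp)]
      omega
    · rw [if_neg (by simp only [beq_iff_eq]; exact fun h => hyx h.symm)]
      by_cases hmem : y ∈ xs
      · rw [if_pos hmem, if_pos (by simp [hmem])]
        omega
      · rw [if_neg hmem, if_neg (by simp [hmem, hyx])]

theorem pairwise_pvL (xs : List Int) (h : xs.Pairwise (· < ·)) (f : Int → Int) :
    (pvL xs f).Pairwise (· ≤ ·) := by
  revert h
  induction xs with
  | nil => intro _; simp [pvL]
  | cons x xs ih =>
    intro h
    rw [List.pairwise_cons] at h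
    simp only [pvL, List.flatMap_cons]
    apply List.pairwise_append.mpr
    refine ⟨List.pairwise_replicate.mpr (Or.inr (le_refl x)), ih h.2, ?_⟩
    intro a ha b hb
    rw [List.eq_of_mem_replicate ha]
    have hb' := (mem_pvL xs f b).mp hb
    exact le_of_lt (h.1 b hb'.1)

theorem erase_pvL (xs : List Int) (h : xs.Pairwise (· < ·)) (f : Int → Int) (v : Int)
    (hv : v ∈ xs) (hf1 : 1 ≤ f v) :
    (pvL xs f).erase v = pvL xs (fun z => if z = v then f z - 1 else f z) := by
  revert h hv
  induction xs with
  | nil => intro _ hv; exact absurd hv (by simp)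
  | cons x xs ih =>
    intro h hv
    rw [List.pairwise_cons] at h
    simp only [pvL, List.flatMap_cons]
    by_cases hxv : x = v
    · subst hxv
      obtain ⟨t, ht⟩ : ∃ t, (f x).toNat = t + 1 := ⟨(f x).toNat - 1, by omega⟩
      rw [ht, List.replicate_succ, List.cons_append, List.erase_cons_head]
      rw [if_pos rfl]
      rw [show (f x - 1).toNat = t by omega]
      congr 1
      have := pvL_congr xs f (fun z => if z = x then f z - 1 else f z) (by
        intro z hz
        beta_reduce
        rw [if_neg (by intro hzv; rw [hzv] at hz; exact absurd (h.1 x hz) (lt_irrefl x))])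
      simp only [pvL] at this ⊢
      exact this
    · have hvxs : v ∈ xs := by
        rcases List.mem_cons.mp hv with h' | h'
        · exact absurd h'.symm hxv
        · exact h'
      rw [List.erase_append_right _ (by
        intro hmem
        exact hxv (List.eq_of_mem_replicate hmem).symm)]
      have hihr := ih h.2 hvxs
      simp only [pvL] at hihr
      rw [hihr, if_neg hxv]

theorem pvConsume_pvL_some (xs : List Int) (hxs : xs.Pairwise (· < ·)) :
    ∀ (m : Nat) (v : Int) (pre : List Int) (f : Int → Int),
      (∀ z ∈ pre, z < v) →
      (∀ x ∈ xs, 0 ≤ f x) →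
      (∀ y, y ∉ xs → v ≤ y → y < v + m → f y ≤ 0) →
      (∀ y, v ≤ y → y < v + m → 1 ≤ f y) →
      pvConsume v m (pre ++ pvL xs f) =
        some (pre ++ pvL xs (fun z => if v ≤ z ∧ z < v + m then f z - 1 else f z)) := by
  intro m
  induction m with
  | zero =>
    intro v pre f hpre hnn hnm hall
    simp only [pvConsume]
    rw [pvL_congr xs (fun z => if v ≤ z ∧ z < v + ((0 : Nat) : Int) then f z - 1 else f z) f (by
      intro z hz
      beta_reduce
      rw [if_neg (by push_cast; omega)])]
  | succ m ih =>
    intro v pre f hpre hnn hnm hall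
    have hv1 : 1 ≤ f v := hall v le_rfl (by push_cast; omega)
    have hvx : v ∈ xs := by
      by_contra hvn
      have := hnm v hvn le_rfl (by push_cast; omega)
      omega
    have hmem : v ∈ pre ++ pvL xs f := by
      rw [List.mem_append, mem_pvL]
      exact Or.inr ⟨hvx, hv1⟩
    simp only [pvConsume, if_pos hmem]
    rw [List.erase_append_right _ (fun hin => absurd (hpre v hin) (lt_irrefl v))]
    rw [erase_pvL xs hxs f v hvx hv1]
    rw [ih (v + 1) pre _ (fun z hz => lt_trans (hpre z hz) (by omega))
      (by
        intro x hx
        by_cases hxv : x = v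
        · rw [if_pos hxv]; rw [hxv]; omega
        · rw [if_neg hxv]; exact hnn x hx)
      (by
        intro y hy h1 h2
        rw [if_neg (by omega)]
        exact hnm y hy (by omega) (by push_cast at h2 ⊢; omega))
      (by
        intro y h1 h2
        rw [if_neg (by omega)]
        exact hall y (by omega) (by push_cast at h2 ⊢; omega))]
    congr 2
    apply pvL_congr
    intro z _
    beta_reduce
    by_cases hzv : z = v
    · subst hzv
      rw [if_neg (by push_cast; omega), if_pos rfl, if_pos (by push_cast; omega)]
    · rw [if_neg hzv]
      by_cases hc : v + 1 ≤ z ∧ z < v + 1 + (m : Int)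
      · rw [if_pos hc, if_pos (by push_cast at hc ⊢; omega)]
      · rw [if_neg hc, if_neg (by push_cast at hc ⊢; omega)]

theorem pvConsume_pvL_none (xs : List Int) (hxs : xs.Pairwise (· < ·)) :
    ∀ (m : Nat) (v : Int) (pre : List Int) (f : Int → Int),
      (∀ z ∈ pre, z < v) →
      (∀ x ∈ xs, 0 ≤ f x) →
      (∃ y, v ≤ y ∧ y < v + m ∧ f y < 1) →
      pvConsume v m (pre ++ pvL xs f) = none := by
  intro m
  induction m with
  | zero =>
    rintro v pre f _ _ ⟨y, h1, h2, _⟩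
    exfalso
    push_cast at h2
    omega
  | succ m ih =>
    rintro v pre f hpre hnn ⟨y, h1, h2, h3⟩
    by_cases hv1 : v ∈ pre ++ pvL xs f
    · have hvx : v ∈ xs ∧ 1 ≤ f v := by
        rcases List.mem_append.mp hv1 with h' | h'
        · exact absurd (hpre v h') (lt_irrefl v)
        · exact (mem_pvL xs f v).mp h'
      simp only [pvConsume, if_pos hv1]
      rw [List.erase_append_right _ (fun hin => absurd (hpre v hin) (lt_irrefl v))]
      rw [erase_pvL xs hxs f v hvx.1 hvx.2]
      apply ih (v + 1) pre _ (fun z hz => lt_trans (hpre z hz) (by omega))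
        (by
          intro x hx
          by_cases hxv : x = v
          · rw [if_pos hxv]; rw [hxv]; omega
          · rw [if_neg hxv]; exact hnn x hx)
      have hyv : y ≠ v := by intro h'; rw [h'] at h3; omega
      refine ⟨y, by omega, by push_cast at h2 ⊢; omega, ?_⟩
      rw [if_neg hyv]
      exact h3
    · simp only [pvConsume, if_neg hv1]

theorem pv_batch_some (k : Int) (hk : 1 ≤ k) (x : Int) (xs : List Int)
    (hxs : xs.Pairwise (· < ·)) (hgt : ∀ x' ∈ xs, x < x') :
    ∀ (c : Nat), 1 ≤ c → ∀ (f : Int → Int),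
      (∀ x' ∈ xs, 0 ≤ f x') →
      (∀ y, y ∉ xs → x < y → f y ≤ 0) →
      (∀ y, x + 1 ≤ y → y < x + k → (c : Int) ≤ f y) →
      pvG k (List.replicate c x ++ pvL xs f) =
        pvG k (pvL xs (fun z => if x + 1 ≤ z ∧ z < x + k then f z - c else f z)) := by
  intro c
  induction c with
  | zero => intro h; exact absurd h (by omega)
  | succ c ih =>
    intro _ f hnn hnm hall
    rw [List.replicate_succ, List.cons_append]
    have hcons := pvConsume_pvL_some xs hxs (k - 1).toNat (x + 1) (List.replicate c x) f
      (by intro z hz; rw [List.eq_of_mem_replicate hz]; omega)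
      hnn
      (by intro y hy h1 h2; exact hnm y hy (by omega))
      (by intro y h1 h2; have := hall y h1 (by omega); omega)
    rw [pvG_cons_some k x _ _ hcons]
    rcases Nat.eq_zero_or_pos c with rfl | hc
    · simp only [List.replicate_zero, List.nil_append]
      congr 1
      apply pvL_congr
      intro z hz
      by_cases hc2 : x + 1 ≤ z ∧ z < x + k
      · rw [if_pos (by omega), if_pos hc2]
        push_cast
        ring
      · rw [if_neg (by omega), if_neg hc2]
    · rw [ih hc _
        (by
          intro x' hx'
          by_cases hr : x + 1 ≤ x' ∧ x' < x + 1 + ((k - 1).toNat : Int)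
          · rw [if_pos hr]
            have := hall x' hr.1 (by omega)
            omega
          · rw [if_neg hr]; exact hnn x' hx')
        (by
          intro y hy hxy
          by_cases hr : x + 1 ≤ y ∧ y < x + 1 + ((k - 1).toNat : Int)
          · rw [if_pos hr]
            have := hnm y hy hxy
            omega
          · rw [if_neg hr]; exact hnm y hy hxy)
        (by
          intro y h1 h2
          rw [if_pos (by omega)]
          have := hall y h1 h2
          omega)]
      congr 1
      apply pvL_congr
      intro z hz
      by_cases hr : x + 1 ≤ z ∧ z < x + k
      · rw [if_pos (by omega)]
        rw [if_pos (by omega), if_pos hr]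
        push_cast
        ring
      · rw [if_neg (by omega)]
        rw [if_neg (by omega), if_neg hr]

theorem pv_batch_none (k : Int) (hk : 1 ≤ k) (x : Int) (xs : List Int)
    (hxs : xs.Pairwise (· < ·)) (hgt : ∀ x' ∈ xs, x < x') :
    ∀ (c : Nat), 1 ≤ c → ∀ (f : Int → Int),
      (∀ x' ∈ xs, 0 ≤ f x') →
      (∀ y, y ∉ xs → x < y → f y ≤ 0) →
      (∃ y, x + 1 ≤ y ∧ y < x + k ∧ f y < (c : Int)) →
      pvG k (List.replicate c x ++ pvL xs f) = false := by
  intro c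
  induction c with
  | zero => intro h; exact absurd h (by omega)
  | succ c ih =>
    rintro _ f hnn hnm ⟨y, h1, h2, h3⟩
    rw [List.replicate_succ, List.cons_append]
    by_cases hc1 : ∀ y', x + 1 ≤ y' → y' < x + k → 1 ≤ f y'
    · have hcons := pvConsume_pvL_some xs hxs (k - 1).toNat (x + 1) (List.replicate c x) f
        (by intro z hz; rw [List.eq_of_mem_replicate hz]; omega)
        hnn
        (by intro y' hy' hb1 hb2; exact hnm y' hy' (by omega))
        (by intro y' hb1 hb2; exact hc1 y' hb1 (by omega))
      rw [pvG_cons_some k x _ _ hcons]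
      have hc0 : 1 ≤ c := by
        by_contra hc0
        have hcz : c = 0 := by omega
        have := hc1 y h1 h2
        omega
      apply ih hc0 _
        (by
          intro x' hx'
          by_cases hr : x + 1 ≤ x' ∧ x' < x + 1 + ((k - 1).toNat : Int)
          · rw [if_pos hr]
            have := hc1 x' hr.1 (by omega)
            omega
          · rw [if_neg hr]; exact hnn x' hx')
        (by
          intro y' hy' hxy
          by_cases hr : x + 1 ≤ y' ∧ y' < x + 1 + ((k - 1).toNat : Int)
          · rw [if_pos hr]
            have := hnm y' hy' hxy
            omega
          · rw [if_neg hr]; exact hnm y' hy' hxy)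
      refine ⟨y, h1, h2, ?_⟩
      rw [if_pos (by omega)]
      omega
    · push_neg at hc1
      obtain ⟨y', hb1, hb2, hb3⟩ := hc1
      exact pvG_cons_none k x _ (pvConsume_pvL_none xs hxs (k - 1).toNat (x + 1)
        (List.replicate c x) f
        (by intro z hz; rw [List.eq_of_mem_replicate hz]; omega)
        hnn ⟨y', hb1, by omega, by omega⟩)

theorem pvInnerB_none (c stop : Int) :
    ∀ (n : Nat) (y : Int) (cnt : PySem.Dict Int Int), (stop - y).toNat = n →
      (∃ y', y ≤ y' ∧ y' < stop ∧ cnt.getD y' 0 < c) → pvInnerB c stop y cnt = none := by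
  intro n
  induction n with
  | zero =>
    rintro y cnt hn ⟨y', h1, h2, _⟩
    exfalso
    omega
  | succ n ih =>
    rintro y cnt hn ⟨y', h1, h2, h3⟩
    rw [pvInnerB, if_pos (by omega)]
    by_cases h0 : cnt.getD y 0 < c
    · rw [if_pos h0]
    · rw [if_neg h0]
      have hyy : y' ≠ y := by
        intro h'
        rw [h'] at h3
        exact h0 h3
      apply ih (y + 1) (cnt.insert y (cnt.getD y 0 - c)) (by omega)
      refine ⟨y', by omega, h2, ?_⟩
      rw [PySem.Dict.getD_insert, if_neg hyy]
      exact h3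

theorem pvInnerB_some (c stop : Int) :
    ∀ (n : Nat) (y : Int) (cnt : PySem.Dict Int Int), (stop - y).toNat = n →
      (∀ y', y ≤ y' → y' < stop → c ≤ cnt.getD y' 0) →
      ∃ cnt', pvInnerB c stop y cnt = some cnt' ∧
        ∀ z, cnt'.getD z 0 = if y ≤ z ∧ z < stop then cnt.getD z 0 - c
          else cnt.getD z 0 := by
  intro n
  induction n with
  | zero =>
    intro y cnt hn hall
    rw [pvInnerB, if_neg (by omega)]
    exact ⟨cnt, rfl, by intro z; rw [if_neg (by omega)]⟩
  | succ n ih =>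
    intro y cnt hn hall
    have hyc : c ≤ cnt.getD y 0 := hall y le_rfl (by omega)
    rw [pvInnerB, if_pos (by omega)]
    rw [if_neg (by omega)]
    obtain ⟨cnt', h1, h2⟩ := ih (y + 1) (cnt.insert y (cnt.getD y 0 - c)) (by omega) (by
      intro y' hy1 hy2
      rw [PySem.Dict.getD_insert, if_neg (by omega)]
      exact hall y' (by omega) hy2)
    refine ⟨cnt', h1, ?_⟩
    intro z
    rw [h2 z, PySem.Dict.getD_insert]
    by_cases hzy : z = y
    · subst hzy
      rw [if_neg (by omega), if_pos rfl, if_pos (by omega)]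
    · rw [if_neg hzy]
      by_cases hz : y + 1 ≤ z ∧ z < stop
      · rw [if_pos hz, if_pos (by omega)]
      · rw [if_neg hz, if_neg (by omega)]

theorem pvOuterB_sim (k : Int) (hk : 1 ≤ k) :
    ∀ (xs : List Int) (b : Int) (cnt : PySem.Dict Int Int),
      xs.Pairwise (· < ·) →
      (∀ x ∈ xs, b < x) →
      (∀ x ∈ xs, 0 ≤ cnt.getD x 0) →
      (∀ y, y ∉ xs → b < y → cnt.getD y 0 ≤ 0) →
      pvOuterB k xs cnt = pvG k (pvL xs (fun z => cnt.getD z 0)) := by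
  intro xs
  induction xs with
  | nil => intro b cnt _ _ _ _; simp [pvOuterB, pvL, pvG]
  | cons x xs ih =>
    intro b cnt hpw hb hnn hnm
    rw [List.pairwise_cons] at hpw
    have hxxs : x ∉ xs := fun h => absurd (hpw.1 x h) (lt_irrefl x)
    simp only [pvOuterB]
    have hc0 : 0 ≤ cnt.getD x 0 := hnn x (by simp)
    have hLdec : pvL (x :: xs) (fun z => cnt.getD z 0) =
        List.replicate (cnt.getD x 0).toNat x ++ pvL xs (fun z => cnt.getD z 0) := by
      simp only [pvL, List.flatMap_cons]
    by_cases hc : cnt.getD x 0 ≠ 0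
    · rw [if_pos hc]
      have hc1 : (1 : Nat) ≤ (cnt.getD x 0).toNat := by omega
      by_cases hall : ∀ y, x + 1 ≤ y → y < x + k → cnt.getD x 0 ≤ cnt.getD y 0
      · obtain ⟨cnt', h1, h2⟩ := pvInnerB_some (cnt.getD x 0) (x + k)
          ((x + k) - (x + 1)).toNat (x + 1) cnt rfl (fun y' hy1 hy2 => hall y' hy1 hy2)
        simp only [h1]
        rw [ih x cnt' hpw.2 hpw.1
          (by
            intro x' hx'
            rw [h2 x']
            by_cases hr : x + 1 ≤ x' ∧ x' < x + k
            · rw [if_pos hr]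
              have := hall x' hr.1 hr.2
              omega
            · rw [if_neg hr]; exact hnn x' (by simp [hx']))
          (by
            intro y hy hxy
            rw [h2 y]
            have hyc : y ∉ x :: xs := by
              intro h'
              rcases List.mem_cons.mp h' with rfl | h''
              · exact absurd hxy (lt_irrefl y)
              · exact hy h''
            have hold : cnt.getD y 0 ≤ 0 := hnm y hyc (lt_trans (hb x (by simp)) hxy)
            by_cases hr : x + 1 ≤ y ∧ y < x + k
            · rw [if_pos hr]; omega
            · rw [if_neg hr]; exact hold)]
        rw [hLdec]
        rw [pv_batch_some k hk x xs hpw.2 hpw.1 (cnt.getD x 0).toNat hc1 _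
          (by intro x' hx'; exact hnn x' (by simp [hx']))
          (by
            intro y hy hxy
            have hyc : y ∉ x :: xs := by
              intro h'
              rcases List.mem_cons.mp h' with rfl | h''
              · exact absurd hxy (lt_irrefl y)
              · exact hy h''
            exact hnm y hyc (lt_trans (hb x (by simp)) hxy))
          (by
            intro y h1' h2'
            have := hall y h1' h2'
            omega)]
        congr 1
        apply pvL_congr
        intro z hz
        rw [h2 z]
        by_cases hr : x + 1 ≤ z ∧ z < x + k
        · rw [if_pos hr, if_pos hr]
          omega
        · rw [if_neg hr, if_neg hr]
      · push_neg at hall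
        obtain ⟨y, h1, h2, h3⟩ := hall
        rw [pvInnerB_none (cnt.getD x 0) (x + k) ((x + k) - (x + 1)).toNat (x + 1) cnt rfl
          ⟨y, h1, h2, h3⟩]
        rw [hLdec]
        rw [pv_batch_none k hk x xs hpw.2 hpw.1 (cnt.getD x 0).toNat hc1 _
          (by intro x' hx'; exact hnn x' (by simp [hx']))
          (by
            intro y' hy' hxy
            have hyc : y' ∉ x :: xs := by
              intro h'
              rcases List.mem_cons.mp h' with rfl | h''
              · exact absurd hxy (lt_irrefl y')
              · exact hy' h''
            exact hnm y' hyc (lt_trans (hb x (by simp)) hxy))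
          ⟨y, h1, h2, by omega⟩]
    · rw [if_neg hc]
      have hcz : cnt.getD x 0 = 0 := by omega
      rw [ih x cnt hpw.2 hpw.1
        (by intro x' hx'; exact hnn x' (by simp [hx']))
        (by
          intro y hy hxy
          by_cases hyx : y = x
          · rw [hyx, hcz]
          · exact hnm y (by simp [hyx, hy]) (lt_trans (hb x (by simp)) hxy))]
      rw [hLdec, hcz]
      simp

theorem validgroup_alt_eq_pvG (arr : List Int) (k : Int) (hk : 1 ≤ k) :
    validgroup_alt arr k = pvG k (PySem.List.sorted arr (fun x => x) false) := by
  simp only [validgroup_alt]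
  rw [if_neg (by omega)]
  rw [PySem.Dict.foldl_insert_getD_add_one_eq_counter]
  have hgetD : ∀ v, (PySem.Dict.counter arr).getD v 0 = (arr.count v : Int) :=
    fun v => PySem.Dict.getD_counter arr v
  have hkeys : (PySem.Dict.counter arr).keys = PySem.Set.ofList arr :=
    PySem.Dict.keys_counter arr
  have hpw : (PySem.List.sorted (PySem.Dict.counter arr).keys (fun x => x) false).Pairwise
      (· < ·) := by
    rw [hkeys]
    exact PySem.List.sorted_ofList_pairwise_lt arr
  have hmem : ∀ y, y ∈ PySem.List.sorted (PySem.Dict.counter arr).keys (fun x => x) false ↔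
      y ∈ arr := by
    intro y
    rw [PySem.List.mem_sorted, hkeys, PySem.Set.mem_ofList]
  set skeys := PySem.List.sorted (PySem.Dict.counter arr).keys (fun x => x) false with hskdef
  cases hsk : skeys with
  | nil =>
    have harr : arr = [] := by
      cases arr with
      | nil => rfl
      | cons a t =>
        have := (hmem a).mpr (by simp)
        rw [hsk] at this
        exact absurd this (by simp)
    rw [harr]
    have hnil : PySem.List.sorted ([] : List Int) (fun x => x) false = [] := rfl
    rw [hnil]
    simp [pvOuterB, pvG]
  | cons h0 t =>
    have hb : ∀ x' ∈ skeys, h0 - 1 < x' := by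
      intro x' hx'
      rw [hsk] at hx'
      rcases List.mem_cons.mp hx' with rfl | h'
      · omega
      · have := hpw
        rw [hsk, List.pairwise_cons] at this
        have := this.1 x' h'
        omega
    rw [← hsk]
    rw [pvOuterB_sim k hk skeys (h0 - 1) (PySem.Dict.counter arr) hpw hb
      (by intro x' _; rw [hgetD]; positivity)
      (by
        intro y hy _
        rw [hgetD]
        have : y ∉ arr := fun h' => hy ((hmem y).mpr h')
        rw [List.count_eq_zero.mpr this]
        simp)]
    have hnd : skeys.Nodup := hpw.imp (fun h => ne_of_lt h)
    have hperm : (pvL skeys (fun z => (PySem.Dict.counter arr).getD z 0)).Perm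
        (PySem.List.sorted arr (fun x => x) false) := by
      rw [List.perm_iff_count]
      intro a
      rw [count_pvL skeys hnd _ a]
      rw [(PySem.List.sorted_perm arr (fun x => x) false).count_eq]
      by_cases ha : a ∈ skeys
      · rw [if_pos ha, hgetD]
        simp
      · rw [if_neg ha]
        have : a ∉ arr := fun h' => ha ((hmem a).mpr h')
        rw [List.count_eq_zero.mpr this]
    have heq := List.eq_of_perm_of_sorted (fun a b _ _ h1 h2 => le_antisymm h1 h2)
      (pairwise_pvL skeys hpw _)
      (PySem.List.sorted_pairwise arr (fun x => x)) hperm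
    rw [heq]

-- ===== VERDICT (by name: the statement is the Claim_ definition above) =====
theorem validgroup_spec : Claim_equal_validgroup := by
  intro arr k _
  unfold Spec_validgroup
  by_cases hk : k ≤ 0
  · rw [validgroup_of_k_nonpos arr k hk]
    unfold validgroup_alt
    simp [hk]
  · have hk1 : 1 ≤ k := by omega
    rw [validgroup_eq_pvG arr k hk1, validgroup_alt_eq_pvG arr k hk1]
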